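-- pv_equiv track=rewrite | github.com/trevorbaca/dornen | dornen/tools/FigureAccumulator.py | reveal
-- ===== SOURCE A (Python) =====
-- def reveal(cells, total):
--     current = 0
--     result = []
--     for cell in cells:
--         cell_ = []
--         result.append(cell_)
--         for item in cell:
--             cell_.append(item)
--             current += 1
--             if current == total:
--                 return result
--     return result
-- ===== SOURCE B (Python) =====
-- def reveal(cells, total):
--     result = []
--     remaining = total
--     for cell in cells:
--         if 0 < remaining <= len(cell):
--             result.append(list(cell[:remaining]))
--             return result
--         result.append(list(cell))
--         remaining -= len(cell)
--     return result
-- ===== Notes on version B (the rewrite author's own statement) =====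
-- stated objective: simpler
-- what changed: Replaces the nested per-item loop and running counter with a single pass over cells that keeps a remaining count and slices the cell containing the last needed item.
import Mathlib
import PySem

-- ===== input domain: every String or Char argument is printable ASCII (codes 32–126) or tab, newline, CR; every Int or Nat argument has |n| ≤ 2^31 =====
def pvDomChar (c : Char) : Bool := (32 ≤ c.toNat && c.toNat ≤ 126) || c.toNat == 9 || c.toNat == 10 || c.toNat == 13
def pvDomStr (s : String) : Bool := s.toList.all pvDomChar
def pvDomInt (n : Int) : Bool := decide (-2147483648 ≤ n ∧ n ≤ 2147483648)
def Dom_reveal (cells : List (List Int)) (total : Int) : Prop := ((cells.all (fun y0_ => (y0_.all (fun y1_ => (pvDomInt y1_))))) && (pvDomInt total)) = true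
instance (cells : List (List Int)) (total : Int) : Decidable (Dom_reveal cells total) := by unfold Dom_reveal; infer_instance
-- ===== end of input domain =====

-- B replaces A's nested per-item loop with a single pass keeping a remaining count and slicing the final cell (objective: simpler).


-- ===== PORT A =====
-- inner loop: appends items to cell_, bumps current, returns early (flag = true) when current == total
def revealInner (items : List Int) (cur total : Int) (acc : List Int) : List Int × Int × Bool :=
  match items with
  | [] => (acc, cur, false)
  | x :: xs =>
    let acc' := acc ++ [x]
    let cur' := cur + 1
    if cur' = total then (acc', cur', true) else revealInner xs cur' total acc'

def revealOuter (cells : List (List Int)) (cur total : Int) (res : List (List Int)) : List (List Int) :=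
  match cells with
  | [] => res
  | c :: cs =>
    let r := revealInner c cur total []
    let res' := res ++ [r.1]
    if r.2.2 then res' else revealOuter cs r.2.1 total res'

def reveal (cells : List (List Int)) (total : Int) : List (List Int) :=
  revealOuter cells 0 total []

-- ===== PORT B =====
-- B: single pass over cells with a remaining count; the cell holding the last needed item is sliced and the loop returns there
def revealBLoop (cells : List (List Int)) (remaining : Int) (res : List (List Int)) : List (List Int) :=
  match cells with
  | [] => res
  | c :: cs =>
    if 0 < remaining ∧ remaining ≤ (c.length : Int) then
      res ++ [c.take remaining.toNat]
    else
      revealBLoop cs (remaining - c.length) (res ++ [c])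

def reveal_alt (cells : List (List Int)) (total : Int) : List (List Int) :=
  revealBLoop cells total []

-- ===== PRECONDITION & SPEC =====
def Spec_reveal (cells : List (List Int)) (total : Int) (out : List (List Int)) : Prop := out = reveal_alt cells total
instance (cells : List (List Int)) (total : Int) (out : List (List Int)) : Decidable (Spec_reveal cells total out) := by unfold Spec_reveal; infer_instance

-- ===== CLAIM (what is proved, stated in full; the proofs are below) =====
def Claim_equal_reveal : Prop := ∀ (cells : List (List Int)) (total : Int), Dom_reveal cells total → Spec_reveal cells total (reveal cells total)

-- ===== LEMMAS AND PROOFS =====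

-- inner loop finishes the cell without stopping when fewer than total - cur items are in it (or total already unreachable)
theorem revealInner_no_stop (items : List Int) (cur total : Int) (acc : List Int)
    (h : total ≤ cur ∨ (items.length : Int) < total - cur) :
    revealInner items cur total acc = (acc ++ items, cur + items.length, false) := by
  induction items generalizing cur acc with
  | nil => simp [revealInner]
  | cons x xs ih =>
    simp only [revealInner]
    simp only [List.length_cons] at h
    rw [if_neg (by push_cast at h ⊢; omega)]
    rw [ih (cur + 1) (acc ++ [x]) (by push_cast at h ⊢; omega)]
    simp
    omega

-- inner loop stops after total - cur items when the cell is long enough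
theorem revealInner_stop (items : List Int) (cur total : Int) (acc : List Int)
    (h : cur < total) (hlen : total - cur ≤ (items.length : Int)) :
    revealInner items cur total acc = (acc ++ items.take (total - cur).toNat, total, true) := by
  induction items generalizing cur acc with
  | nil => simp at hlen; omega
  | cons x xs ih =>
    simp only [revealInner]
    by_cases hc : cur + 1 = total
    · rw [if_pos hc]
      have : (total - cur).toNat = 1 := by omega
      simp [this, hc]
    · rw [if_neg hc]
      rw [ih (cur + 1) (acc ++ [x]) (by omega) (by simp at hlen ⊢; omega)]
      have h1 : (total - cur).toNat = (total - (cur + 1)).toNat + 1 := by omega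
      simp [h1]

-- main invariant: A's outer loop at counter cur equals B's loop with remaining = total - cur
theorem revealOuter_eq_bloop (cells : List (List Int)) (cur total : Int) (res : List (List Int)) :
    revealOuter cells cur total res = revealBLoop cells (total - cur) res := by
  induction cells generalizing cur res with
  | nil => simp [revealOuter, revealBLoop]
  | cons c cs ih =>
    simp only [revealOuter, revealBLoop]
    by_cases hstop : cur < total ∧ total - cur ≤ (c.length : Int)
    · rw [revealInner_stop c cur total [] hstop.1 hstop.2]
      simp only [List.nil_append]
      rw [if_pos (by simp)]
      rw [if_pos (by omega)]
    · rw [revealInner_no_stop c cur total [] (by omega)]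
      simp only [List.nil_append]
      rw [if_neg (by simp)]
      rw [if_neg (by omega)]
      rw [ih (cur + c.length) (res ++ [c])]
      have : total - cur - (c.length : Int) = total - (cur + c.length) := by omega
      rw [this]

-- ===== VERDICT (by name: the statement is the Claim_ definition above) =====
theorem reveal_spec : Claim_equal_reveal := by
  intro cells total _
  unfold Spec_reveal reveal reveal_alt
  rw [revealOuter_eq_bloop cells 0 total []]
  simp
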